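-- pv_equiv track=rewrite | github.com/Rafael-Remigio/RushHour-AI | commonMethods.py | stringToGrid
-- ===== SOURCE A (Python) =====
-- import math
--
-- def stringToGrid(mapString):
--     """Initializes Map Tuple from a MapString Representation"""
--     mapString = mapString.split(" ")[1]
--     grid_size = int(math.sqrt(len(mapString)))
--     pieceSet = []
--     grid = []
--     line = []
--     for i, pos in enumerate(mapString):
--
--         # Creates an Array with all the diferent Pieces
--         if (pos not in {"o","x"} ) and (pos not in pieceSet):
--             pieceSet.append(pos)
--
--         #
--         line.append(pos)
--         if (i + 1) % grid_size == 0: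
--             grid.append(line)
--             line = []
--
--     return (grid,pieceSet,"")
-- ===== SOURCE B (Python) =====
-- import math
--
-- def stringToGrid(mapString):
--     """Initializes Map Tuple from a MapString Representation (slicing/two-pass version)"""
--     mapString = mapString.split(" ")[1]
--     if not mapString:
--         return ([], [], "")
--     grid_size = math.isqrt(len(mapString))
--     cut = len(mapString) - len(mapString) % grid_size
--     grid = [list(mapString[i:i + grid_size]) for i in range(0, cut, grid_size)]
--     pieces = list(dict.fromkeys(c for c in mapString if c != "o" and c != "x"))
--     return (grid, pieces, "")
-- ===== Notes on version B (the rewrite author's own statement) =====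
-- stated objective: simpler
-- what changed: B replaces A's single indexed loop with its incremental line buffer and (i+1)%grid_size test by two independent passes: the grid is built by slicing the token into grid_size-sized chunks (truncating the partial trailing row via len%grid_size) and the piece list by an ordered dedup (dict.fromkeys) of the characters filtered of 'o'/'x'.
import Mathlib
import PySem

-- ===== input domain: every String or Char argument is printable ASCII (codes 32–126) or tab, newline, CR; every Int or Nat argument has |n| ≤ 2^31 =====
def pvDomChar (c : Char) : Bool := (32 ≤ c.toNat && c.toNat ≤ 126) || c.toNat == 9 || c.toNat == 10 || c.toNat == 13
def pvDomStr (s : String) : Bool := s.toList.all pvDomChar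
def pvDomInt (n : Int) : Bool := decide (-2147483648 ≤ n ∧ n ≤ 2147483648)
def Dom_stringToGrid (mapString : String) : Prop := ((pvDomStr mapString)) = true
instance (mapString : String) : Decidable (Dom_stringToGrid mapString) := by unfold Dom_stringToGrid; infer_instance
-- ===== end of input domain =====

-- B builds the grid by chunk slicing and the piece list by an ordered dedup of the filtered
-- characters (two independent passes) instead of A's single indexed loop — simpler decomposition, same result.

-- ===== PORT A =====
-- A-side helpers: the body of A's loop, as the piece-list update and the grid/line update
def pvPieceStep (pieceSet : List String) (ip : Int × Char) : List String :=
  let pos := String.singleton ip.2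
  if (pos ≠ "o" ∧ pos ≠ "x") ∧ pos ∉ pieceSet then pieceSet ++ [pos] else pieceSet

def pvRowStep (gridSize : Nat) (st : List (List String) × List String) (ip : Int × Char) :
    List (List String) × List String :=
  let line := st.2 ++ [String.singleton ip.2]
  -- (i + 1) % grid_size == 0  (Python % — positive divisor here; loop empty when gridSize = 0)
  if PySem.Int.mod (ip.1 + 1) (gridSize : Int) = 0 then (st.1 ++ [line], []) else (st.1, line)

def pvCoreA (cs : List Char) : List (List String) × List String × String :=
  -- int(math.sqrt(len(mapString))): equals Nat.sqrt at every length < 2^52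
  let gridSize : Nat := Nat.sqrt cs.length
  let r := (PySem.List.enumerate cs).foldl
      (fun st ip => (pvPieceStep st.1 ip, pvRowStep gridSize st.2 ip))
      (([] : List String), ([] : List (List String)), ([] : List String))
  (r.2.1, r.1, "")

def stringToGrid (mapString : String) : List (List String) × List String × String :=
  -- mapString.split(" ")[1]: IndexError when mapString has no space — excluded by Pre_ (default "" outside it)
  pvCoreA (PySem.List.pyGetD ((PySem.Str.split? mapString " ").getD []) 1 "").toList

-- ===== PORT B =====
def pvCoreB (cs : List Char) : List (List String) × List String × String :=
  if cs = [] then ([], [], "")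
  else
    let n : Int := (cs.length : Int)
    let gridSize : Nat := Nat.sqrt cs.length   -- math.isqrt(len(mapString))
    let cut : Int := n - PySem.Int.mod n (gridSize : Int)
    let grid := (PySem.List.pyRange 0 cut (gridSize : Int)).map
        (fun i => (PySem.List.slice cs (some i) (some (i + (gridSize : Int)))).map String.singleton)
    let pieces := (PySem.List.dedup (cs.filter (fun c => c != 'o' && c != 'x'))).map String.singleton
    (grid, pieces, "")

def stringToGrid_alt (mapString : String) : List (List String) × List String × String :=
  -- same first line as A: mapString.split(" ")[1] (IndexError when no space — excluded by Pre_)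
  pvCoreB (PySem.List.pyGetD ((PySem.Str.split? mapString " ").getD []) 1 "").toList

-- ===== PRECONDITION & SPEC =====
-- Pre_ excludes exactly the inputs without a space, on which A's 'mapString.split(" ")[1]' raises IndexError.
def Pre_stringToGrid (mapString : String) : Prop := PySem.Str.isIn " " mapString = true
instance (mapString : String) : Decidable (Pre_stringToGrid mapString) := by unfold Pre_stringToGrid; infer_instance
def pvWitness_stringToGrid : String := "map oxAB"

def Spec_stringToGrid (mapString : String) (out : List (List String) × List String × String) : Prop := out = stringToGrid_alt mapString
instance (mapString : String) (out : List (List String) × List String × String) : Decidable (Spec_stringToGrid mapString out) := by unfold Spec_stringToGrid; infer_instance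

-- ===== CLAIM (what is proved, stated in full; the proofs are below) =====
def Claim_equal_stringToGrid : Prop := ∀ (mapString : String), Dom_stringToGrid mapString → Pre_stringToGrid mapString → Spec_stringToGrid mapString (stringToGrid mapString)

-- ===== LEMMAS AND PROOFS =====

lemma pvSing_inj {a b : Char} (h : String.singleton a = String.singleton b) : a = b := by
  have := congrArg String.toList h
  simpa using this

lemma pvSing_mem_map {c : Char} {q : List Char} :
    String.singleton c ∈ q.map String.singleton ↔ c ∈ q := by
  constructor
  · intro h
    rcases List.mem_map.mp h with ⟨d, hd, hdc⟩
    exact (pvSing_inj hdc.symm) ▸ hd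
  · exact fun h => List.mem_map_of_mem h

lemma pvSing_eq_o {c : Char} : String.singleton c = "o" ↔ c = 'o' := by
  constructor
  · intro h; exact pvSing_inj (h.trans (by decide))
  · rintro rfl; decide

lemma pvSing_eq_x {c : Char} : String.singleton c = "x" ↔ c = 'x' := by
  constructor
  · intro h; exact pvSing_inj (h.trans (by decide))
  · rintro rfl; decide

lemma pvPiece_fold (cs : List Char) : ∀ (s : Int) (q : List Char),
    (PySem.List.enumerate cs s).foldl pvPieceStep (q.map String.singleton)
      = ((cs.filter fun c => c != 'o' && c != 'x').foldl PySem.Set.add q).map String.singleton := by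
  induction cs with
  | nil => intro s q; simp [PySem.List.enumerate]
  | cons c cs ih =>
    intro s q
    rw [PySem.List.enumerate_cons]
    simp only [List.foldl_cons, List.filter_cons]
    by_cases hc : c = 'o' ∨ c = 'x'
    · have hp : (c != 'o' && c != 'x') = false := by
        rcases hc with rfl | rfl <;> simp
      have hstep : pvPieceStep (q.map String.singleton) (s, c) = q.map String.singleton := by
        unfold pvPieceStep
        rw [if_neg]
        rintro ⟨⟨h1, h2⟩, _⟩
        rcases hc with rfl | rfl
        · exact h1 (pvSing_eq_o.mpr rfl)
        · exact h2 (pvSing_eq_x.mpr rfl)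
      rw [hstep, if_neg (by rw [hp]; exact Bool.false_ne_true)]
      exact ih (s + 1) q
    · rw [not_or] at hc
      have hp : (c != 'o' && c != 'x') = true := by
        simp [hc.1, hc.2]
      rw [if_pos hp]
      simp only [List.foldl_cons]
      by_cases hq : c ∈ q
      · have hstep : pvPieceStep (q.map String.singleton) (s, c) = q.map String.singleton := by
          unfold pvPieceStep
          rw [if_neg]
          rintro ⟨_, h2⟩
          exact h2 (pvSing_mem_map.mpr hq)
        have hadd : PySem.Set.add q c = q := by
          simp [PySem.Set.add, PySem.Set.contains, hq]
        rw [hstep, hadd]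
        exact ih (s + 1) q
      · have hstep : pvPieceStep (q.map String.singleton) (s, c)
            = (q ++ [c]).map String.singleton := by
          unfold pvPieceStep
          rw [if_pos]
          · simp
          · exact ⟨⟨fun h => hc.1 (pvSing_eq_o.mp h), fun h => hc.2 (pvSing_eq_x.mp h)⟩,
              fun h => hq (pvSing_mem_map.mp h)⟩
        have hadd : PySem.Set.add q c = q ++ [c] := by
          simp [PySem.Set.add, PySem.Set.contains, hq]
        rw [hstep, hadd]
        exact ih (s + 1) (q ++ [c])

-- proof-side spec of A's grid loop: r = characters still to go in the current row, buf = the row so far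
def pvRows (g : Nat) : Nat → List String → List Char → List (List String) × List String
  | _, buf, [] => ([], buf)
  | r, buf, c :: cs =>
    if r = 1 then
      let p := pvRows g g [] cs
      ((buf ++ [String.singleton c]) :: p.1, p.2)
    else
      pvRows g (r - 1) (buf ++ [String.singleton c]) cs

lemma pvRowfold (g : Nat) (hg : 0 < g) : ∀ (cs : List Char) (k r : Nat), 0 < r → r ≤ g → g ∣ (k + r) →
    ∀ (grid : List (List String)) (buf : List String),
    (PySem.List.enumerate cs (k : Int)).foldl (pvRowStep g) (grid, buf)
      = (grid ++ (pvRows g r buf cs).1, (pvRows g r buf cs).2) := by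
  intro cs
  induction cs with
  | nil => intro k r _ _ _ grid buf; simp [PySem.List.enumerate, pvRows]
  | cons c cs ih =>
    intro k r hr hrg hdvd grid buf
    rw [PySem.List.enumerate_cons]
    simp only [List.foldl_cons]
    have hcond : (PySem.Int.mod ((k : Int) + 1) (g : Int) = 0) ↔ (g ∣ (k + 1)) := by
      rw [PySem.Int.mod_eq_zero_iff_dvd]
      constructor
      · intro h; exact_mod_cast h
      · intro h; exact_mod_cast h
    by_cases hr1 : r = 1
    · subst hr1
      have hk1 : g ∣ (k + 1) := hdvd
      have hstep : pvRowStep g (grid, buf) ((k : Int), c)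
          = (grid ++ [buf ++ [String.singleton c]], []) := by
        unfold pvRowStep
        rw [if_pos (hcond.mpr hk1)]
      rw [hstep]
      have hrec := ih (k + 1) g hg le_rfl (Dvd.dvd.add hk1 (dvd_refl g))
        (grid ++ [buf ++ [String.singleton c]]) []
      rw [show ((k : Int) + 1) = (((k + 1 : Nat)) : Int) by push_cast; ring, hrec]
      simp only [pvRows, if_true]
      simp [List.append_assoc]
    · have hk1 : ¬ g ∣ (k + 1) := by
        intro h
        have h2 : g ∣ (k + r) - (k + 1) := Nat.dvd_sub hdvd h
        rw [show (k + r) - (k + 1) = r - 1 by omega] at h2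
        have hle := Nat.le_of_dvd (by omega) h2
        omega
      have hstep : pvRowStep g (grid, buf) ((k : Int), c)
          = (grid, buf ++ [String.singleton c]) := by
        unfold pvRowStep
        rw [if_neg (fun h => hk1 (hcond.mp h))]
      rw [hstep]
      have hrec := ih (k + 1) (r - 1) (by omega) (by omega) (by
        rw [show k + 1 + (r - 1) = k + r by omega]; exact hdvd) grid (buf ++ [String.singleton c])
      rw [show ((k : Int) + 1) = (((k + 1 : Nat)) : Int) by push_cast; ring, hrec]
      simp only [pvRows]
      rw [if_neg hr1]

-- proof-side spec of B's grid: the rows, one full chunk at a time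
def pvChunks (g : Nat) (cs : List Char) : List (List String) :=
  if h : 0 < g ∧ g ≤ cs.length then
    (cs.take g).map String.singleton :: pvChunks g (cs.drop g)
  else []
termination_by cs.length
decreasing_by simp; omega

lemma pvRows_spec (g : Nat) (hg : 0 < g) : ∀ (cs : List Char) (r : Nat), 0 < r → r ≤ g →
    ∀ (buf : List String),
    (pvRows g r buf cs).1
      = if r ≤ cs.length then (buf ++ (cs.take r).map String.singleton) :: pvChunks g (cs.drop r)
        else [] := by
  intro cs
  induction cs with
  | nil =>
    intro r hr _ buf
    simp only [pvRows, List.length_nil]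
    rw [if_neg (by omega)]
  | cons c cs ih =>
    intro r hr hrg buf
    by_cases hr1 : r = 1
    · subst hr1
      simp only [pvRows, if_true]
      rw [if_pos (show (1:Nat) ≤ (c :: cs).length by simp)]
      have htail : (pvRows g g [] cs).1 = pvChunks g cs := by
        rw [ih g hg le_rfl []]
        conv_rhs => rw [pvChunks]
        by_cases h : g ≤ cs.length
        · rw [dif_pos ⟨hg, h⟩, if_pos h]; simp
        · rw [dif_neg (fun hh => h hh.2), if_neg h]
      simp [htail]
    · simp only [pvRows]
      rw [if_neg hr1]
      rw [ih (r - 1) (by omega) (by omega) (buf ++ [String.singleton c])]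
      have hlen : (r - 1 ≤ cs.length) ↔ (r ≤ (c :: cs).length) := by
        simp [List.length_cons]
      by_cases h : r - 1 ≤ cs.length
      · rw [if_pos h, if_pos (hlen.mp h)]
        have htake : (c :: cs).take r = c :: cs.take (r - 1) := by
          rw [show r = (r - 1) + 1 by omega]
          simp [List.take_succ_cons]
        have hdrop : (c :: cs).drop r = cs.drop (r - 1) := by
          rw [show r = (r - 1) + 1 by omega]
          simp [List.drop_succ_cons]
        rw [htake, hdrop]
        simp [List.append_assoc]
      · rw [if_neg h, if_neg (fun hh => h (hlen.mpr hh))]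

lemma pvChunks_range (g : Nat) (hg : 0 < g) : ∀ (cs : List Char),
    pvChunks g cs = (List.range (cs.length / g)).map
      (fun k => ((cs.drop (g * k)).take g).map String.singleton) := by
  intro cs
  induction hn : cs.length using Nat.strong_induction_on generalizing cs with
  | _ n ih =>
    subst hn
    rw [pvChunks]
    by_cases h : g ≤ cs.length
    · rw [dif_pos ⟨hg, h⟩]
      have hq : cs.length / g = (cs.length - g) / g + 1 := by
        conv_lhs => rw [show cs.length = (cs.length - g) + g by omega]
        rw [Nat.add_div_right _ hg]
      have ihd := ih (cs.drop g).length (by simp; omega) (cs.drop g) rfl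
      have htail : List.map (fun k => ((List.drop (g * k) (List.drop g cs)).take g).map String.singleton)
            (List.range ((cs.length - g) / g))
          = List.map ((fun k => ((cs.drop (g * k)).take g).map String.singleton) ∘ Nat.succ)
            (List.range ((cs.length - g) / g)) := by
        apply List.map_congr_left
        intro k _
        simp only [Function.comp_apply, Nat.succ_eq_add_one]
        rw [List.drop_drop, show g + g * k = g * (k + 1) by ring]
      rw [hq, List.range_succ_eq_map, List.map_cons, List.map_map, ihd]
      simp only [List.length_drop]
      rw [htail]
      congr 1
    · rw [dif_neg (fun hh => h hh.2), Nat.div_eq_of_lt (by omega)]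
      simp

lemma pvGridB (g : Nat) (hg : 0 < g) (cs : List Char) :
    (PySem.List.pyRange 0 ((cs.length : Int) - PySem.Int.mod (cs.length : Int) (g : Int)) (g : Int)).map
        (fun i => (PySem.List.slice cs (some i) (some (i + (g : Int)))).map String.singleton)
      = (List.range (cs.length / g)).map
          (fun k => ((cs.drop (g * k)).take g).map String.singleton) := by
  have hmod : PySem.Int.mod ((cs.length : Nat) : Int) ((g : Nat) : Int)
      = (((cs.length % g : Nat)) : Int) := PySem.Int.mod_natCast cs.length g
  have hdmI : (g : Int) * ((cs.length / g : Nat) : Int) + ((cs.length % g : Nat) : Int)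
      = (cs.length : Int) := by exact_mod_cast Nat.div_add_mod cs.length g
  have hcut : ((cs.length : Int) - (((cs.length % g : Nat)) : Int))
      = (((cs.length / g * g : Nat)) : Int) := by
    rw [Nat.cast_mul]; linarith [hdmI]
  rw [hmod, hcut, PySem.List.pyRange_of_pos 0 _ (by exact_mod_cast hg)]
  have hcount : (if (0 : Int) < (((cs.length / g * g : Nat)) : Int)
      then (((((cs.length / g * g : Nat)) : Int) - 0 + (g : Int) - 1) / (g : Int)).toNat else 0)
      = cs.length / g := by
    by_cases hq : cs.length / g = 0
    · rw [hq]; simp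
    · have hpos : (0 : Int) < (((cs.length / g * g : Nat)) : Int) := by
        exact_mod_cast Nat.mul_pos (Nat.pos_of_ne_zero hq) hg
      rw [if_pos hpos]
      have h1 : ((((cs.length / g * g : Nat)) : Int) - 0 + (g : Int) - 1)
          = (((cs.length / g * g + (g - 1) : Nat)) : Int) := by
        rw [Nat.cast_add, Nat.cast_sub (show 1 ≤ g by omega), Nat.cast_one]
        ring
      rw [h1, show ((g : Int)) = (((g : Nat)) : Int) from rfl,
        ← Int.natCast_div, Int.toNat_natCast]
      rw [Nat.add_comm, Nat.add_mul_div_right _ _ hg, Nat.div_eq_of_lt (by omega)]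
      omega
  rw [hcount, List.map_map]
  apply List.map_congr_left
  intro k _
  simp only [Function.comp_apply]
  have hi : ((0 : Int) + (g : Int) * (k : Int)) = (((g * k : Nat)) : Int) := by push_cast; ring
  rw [hi, show ((((g * k : Nat)) : Int) + (g : Int)) = (((g * k : Nat) : Int) + ((g : Nat) : Int)) from rfl,
    PySem.List.slice_natCast_add]

lemma pvCore_eq (cs : List Char) : pvCoreA cs = pvCoreB cs := by
  by_cases hcs : cs = []
  · subst hcs; rfl
  · unfold pvCoreA pvCoreB
    rw [if_neg hcs]
    dsimp only
    have hlen : 0 < cs.length := List.length_pos_of_ne_nil hcs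
    have hg : 0 < Nat.sqrt cs.length := Nat.sqrt_pos.mpr hlen
    rw [PySem.List.foldl_prod_mk pvPieceStep (pvRowStep (Nat.sqrt cs.length))]
    dsimp only
    have hpieces : (PySem.List.enumerate cs 0).foldl pvPieceStep ([] : List String)
        = (PySem.List.dedup (cs.filter (fun c => c != 'o' && c != 'x'))).map String.singleton := by
      have h := pvPiece_fold cs 0 []
      simp only [List.map_nil] at h
      rw [h, ← PySem.Set.ofList_eq_foldl, ← PySem.List.dedup_eq_ofList]
    have hgrid : ((PySem.List.enumerate cs 0).foldl (pvRowStep (Nat.sqrt cs.length))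
          (([] : List (List String)), ([] : List String))).1
        = (PySem.List.pyRange 0 ((cs.length : Int) - PySem.Int.mod (cs.length : Int) ((Nat.sqrt cs.length : Nat) : Int)) ((Nat.sqrt cs.length : Nat) : Int)).map
            (fun i => (PySem.List.slice cs (some i) (some (i + ((Nat.sqrt cs.length : Nat) : Int)))).map String.singleton) := by
      have h0 := pvRowfold (Nat.sqrt cs.length) hg cs 0 (Nat.sqrt cs.length) hg le_rfl
        (by simp) [] []
      rw [show (((0 : Nat)) : Int) = (0 : Int) from rfl] at h0
      rw [h0]
      have h1 : (pvRows (Nat.sqrt cs.length) (Nat.sqrt cs.length) [] cs).1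
          = pvChunks (Nat.sqrt cs.length) cs := by
        rw [pvRows_spec (Nat.sqrt cs.length) hg cs (Nat.sqrt cs.length) hg le_rfl []]
        conv_rhs => rw [pvChunks]
        by_cases h : Nat.sqrt cs.length ≤ cs.length
        · rw [dif_pos ⟨hg, h⟩, if_pos h]; simp
        · rw [dif_neg (fun hh => h hh.2), if_neg h]
      simp only [List.nil_append]
      rw [h1, pvChunks_range _ hg cs, ← pvGridB _ hg cs]
    rw [← hpieces, ← hgrid]

-- ===== VERDICT (by name: the statement is the Claim_ definition above) =====
theorem stringToGrid_spec : Claim_equal_stringToGrid := by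
  intro mapString _ _
  unfold Spec_stringToGrid stringToGrid stringToGrid_alt
  exact pvCore_eq _
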